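-- pv_equiv track=rewrite | github.com/dorshamo/MLM | LAB/lab7/lab7_ex1.py | create_new_list
-- ===== SOURCE A (Python) =====
-- def create_new_list(lst,x):
--     new_lst = []
--     temp_lst = []
--     for i in lst:
--         if i < x:
--             new_lst.append(i)
--         else:
--             temp_lst.append(i)
--     new_lst+=temp_lst
--     return new_lst
-- ===== SOURCE B (Python) =====
-- def create_new_list(lst, x):
--     # Stable sort by the boolean key (i >= x): elements below x (key False)
--     # come first, all in original order, thanks to sort stability.
--     return sorted(lst, key=lambda i: i >= x)
-- ===== Notes on version B (the rewrite author's own statement) =====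
-- stated objective: idiomatic
-- what changed: Replaces A's single loop maintaining two accumulator lists with a stable sort keyed by the boolean i >= x, relying on sort stability for the in-group order.
import Mathlib
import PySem

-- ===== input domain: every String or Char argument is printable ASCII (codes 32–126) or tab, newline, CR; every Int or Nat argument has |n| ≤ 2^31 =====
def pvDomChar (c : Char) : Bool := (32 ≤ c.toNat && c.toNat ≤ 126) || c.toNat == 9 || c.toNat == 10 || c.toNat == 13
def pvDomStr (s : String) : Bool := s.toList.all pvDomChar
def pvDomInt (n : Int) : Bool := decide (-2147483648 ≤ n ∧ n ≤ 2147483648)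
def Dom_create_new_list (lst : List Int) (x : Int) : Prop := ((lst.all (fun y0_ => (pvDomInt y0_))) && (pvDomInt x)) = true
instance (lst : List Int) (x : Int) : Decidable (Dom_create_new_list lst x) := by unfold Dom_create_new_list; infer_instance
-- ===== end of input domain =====

-- B replaces A's single loop with two accumulator lists by a stable sort keyed by the boolean i >= x (idiomatic).


-- ===== PORT A =====
-- single loop appending to new_lst (i < x) or temp_lst (i >= x), then new_lst += temp_lst
def create_new_list (lst : List Int) (x : Int) : List Int :=
  let p := lst.foldl (fun (acc : List Int × List Int) i =>
    if i < x then (acc.1 ++ [i], acc.2) else (acc.1, acc.2 ++ [i])) ([], [])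
  p.1 ++ p.2

-- ===== PORT B =====
-- B: stable sort by the boolean key (i >= x); elements with key false (< x) come first in order
def create_new_list_alt (lst : List Int) (x : Int) : List Int :=
  PySem.List.sorted lst (fun i => decide (x ≤ i))

-- ===== PRECONDITION & SPEC =====
def Spec_create_new_list (lst : List Int) (x : Int) (out : List Int) : Prop := out = create_new_list_alt lst x
instance (lst : List Int) (x : Int) (out : List Int) : Decidable (Spec_create_new_list lst x out) := by unfold Spec_create_new_list; infer_instance

-- ===== CLAIM (what is proved, stated in full; the proofs are below) =====
def Claim_equal_create_new_list : Prop := ∀ (lst : List Int) (x : Int), Dom_create_new_list lst x → Spec_create_new_list lst x (create_new_list lst x)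

-- ===== LEMMAS AND PROOFS =====

-- A's loop builds exactly (filter (< x), filter (≥ x))
theorem foldl_partition (lst : List Int) (x : Int) (a b : List Int) :
    lst.foldl (fun (acc : List Int × List Int) i =>
      if i < x then (acc.1 ++ [i], acc.2) else (acc.1, acc.2 ++ [i])) (a, b)
    = (a ++ lst.filter (fun i => decide (i < x)), b ++ lst.filter (fun i => decide (x ≤ i))) := by
  induction lst generalizing a b with
  | nil => simp
  | cons h t ih =>
    by_cases hx : h < x
    · simp [List.foldl, hx, ih, not_le.mpr hx]
    · simp [List.foldl, hx, ih, not_lt.mp hx]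

-- inserting an element < x into (A ++ B), with A all < x and B all ≥ x, lands between A and B
theorem insertBy_lt (x i : Int) (hi : i < x) (A B : List Int)
    (hA : ∀ a ∈ A, a < x) (hB : ∀ b ∈ B, x ≤ b) :
    PySem.List.insertBy (fun a b => decide ((decide (x ≤ a)) < (decide (x ≤ b)))) i (A ++ B)
      = A ++ i :: B := by
  induction A with
  | nil =>
    cases B with
    | nil => simp [PySem.List.insertBy]
    | cons b B' =>
      have hb : x ≤ b := hB b (by simp)
      simp [PySem.List.insertBy, not_le.mpr hi, hb]
  | cons a A' ih =>
    have ha : a < x := hA a (by simp)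
    have := ih (fun a' ha' => hA a' (by simp [ha']))
    simp [PySem.List.insertBy, not_le.mpr hi, not_le.mpr ha] at this ⊢
    exact this

-- inserting an element ≥ x goes to the very end (its key is maximal)
theorem insertBy_ge (x i : Int) (hi : x ≤ i) (L : List Int) :
    PySem.List.insertBy (fun a b => decide ((decide (x ≤ a)) < (decide (x ≤ b)))) i L
      = L ++ [i] := by
  apply PySem.List.insertBy_of_forall_not_before
  intro y _
  simp [hi]

-- insertion-sort loop invariant: starting from a partitioned accumulator A ++ B,
-- the fold keeps it partitioned and appends the partitioned remainder
theorem foldl_insertBy_partition (x : Int) (lst : List Int) :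
    ∀ (A B : List Int), (∀ a ∈ A, a < x) → (∀ b ∈ B, x ≤ b) →
    lst.foldl (fun acc i =>
        PySem.List.insertBy (fun a b => decide ((decide (x ≤ a)) < (decide (x ≤ b)))) i acc)
      (A ++ B)
    = (A ++ lst.filter (fun i => decide (i < x))) ++ (B ++ lst.filter (fun i => decide (x ≤ i))) := by
  induction lst with
  | nil => intro A B _ _; simp
  | cons i t ih =>
    intro A B hA hB
    by_cases hx : i < x
    · have h1 : PySem.List.insertBy (fun a b => decide ((decide (x ≤ a)) < (decide (x ≤ b)))) i (A ++ B)
          = (A ++ [i]) ++ B := by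
        rw [insertBy_lt x i hx A B hA hB]; simp
      have h2 := ih (A ++ [i]) B
        (by intro a ha; rcases List.mem_append.mp ha with h | h
            · exact hA a h
            · simp at h; omega) hB
      simp only [List.foldl_cons, h1, h2]
      simp [hx, not_le.mpr hx]
    · have hgx : x ≤ i := not_lt.mp hx
      have h1 : PySem.List.insertBy (fun a b => decide ((decide (x ≤ a)) < (decide (x ≤ b)))) i (A ++ B)
          = A ++ (B ++ [i]) := by
        rw [insertBy_ge x i hgx]; simp
      have h2 := ih A (B ++ [i]) hA
        (by intro b hb; rcases List.mem_append.mp hb with h | h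
            · exact hB b h
            · simp at h; omega)
      simp only [List.foldl_cons, h1, h2]
      simp [hx, hgx]

-- ===== VERDICT (by name: the statement is the Claim_ definition above) =====
theorem create_new_list_spec : Claim_equal_create_new_list := by
  intro lst x _
  unfold Spec_create_new_list create_new_list create_new_list_alt
  rw [PySem.List.sorted_eq_foldl_insertBy]
  have := foldl_insertBy_partition x lst [] [] (by simp) (by simp)
  simp only [List.nil_append] at this
  simp [foldl_partition, this]
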